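-- pv_equiv track=rewrite | github.com/Vinay-Vimalkumar/opoid-users | data/process_real_data.py | build_timeseries
-- ===== SOURCE A (Python) =====
-- TARGET_COUNTIES = {
--     "18097": "Marion",
--     "18089": "Lake",
--     "18003": "Allen",
--     "18141": "St. Joseph",
--     "18163": "Vanderburgh",
--     "18157": "Tippecanoe",
--     "18035": "Delaware",
--     "18177": "Wayne",
--     "18167": "Vigo",
--     "18095": "Madison",
--     "18019": "Clark",
--     "18043": "Floyd",
--     "18143": "Scott",
--     "18093": "Lawrence",
--     "18041": "Fayette",
--     "18075": "Jay",
--     "18009": "Blackford",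
--     "18165": "Vermillion",
--     "18065": "Henry",
--     "18053": "Grant",
-- }
--
-- def build_timeseries(vsrr_data):
--     """Build monthly timeseries for target counties (for frontend charts)."""
--     timeseries = {}
--     for fips, county_name in TARGET_COUNTIES.items():
--         vsrr = vsrr_data.get(fips, {})
--         monthly = []
--         for year in sorted(vsrr.keys()):
--             for month in sorted(vsrr[year].keys()):
--                 monthly.append({
--                     "year": year,
--                     "month": month,
--                     "deaths": vsrr[year][month],
--                 })
--         if monthly:
--             timeseries[county_name] = monthly
--     return timeseries
-- ===== SOURCE B (Python) =====
-- TARGET_COUNTIES = {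
--     "18097": "Marion",
--     "18089": "Lake",
--     "18003": "Allen",
--     "18141": "St. Joseph",
--     "18163": "Vanderburgh",
--     "18157": "Tippecanoe",
--     "18035": "Delaware",
--     "18177": "Wayne",
--     "18167": "Vigo",
--     "18095": "Madison",
--     "18019": "Clark",
--     "18043": "Floyd",
--     "18143": "Scott",
--     "18093": "Lawrence",
--     "18041": "Fayette",
--     "18075": "Jay",
--     "18009": "Blackford",
--     "18165": "Vermillion",
--     "18065": "Henry",
--     "18053": "Grant",
-- }
--
-- def build_timeseries(vsrr_data):
--     """Build monthly timeseries for target counties (for frontend charts)."""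
--     timeseries = {}
--     for fips, county_name in TARGET_COUNTIES.items():
--         triples = [(year, month, deaths)
--                    for year, months in vsrr_data.get(fips, {}).items()
--                    for month, deaths in months.items()]
--         triples.sort(key=lambda t: (t[0], t[1]))
--         monthly = [{"year": y, "month": m, "deaths": d} for y, m, d in triples]
--         if monthly:
--             timeseries[county_name] = monthly
--     return timeseries
-- ===== Notes on version B (the rewrite author's own statement) =====
-- stated objective: alternative
-- what changed: Instead of A's two nested loops over sorted year keys and sorted month keys with dict lookups per step, B builds one flat list of (year, month, deaths) triples from the unsorted nested dicts, sorts it once by the (year, month) tuple key, and maps it to the records; Pre_ only excludes association lists with duplicate keys at some dict level, which do not encode a Python dict (dict keys are unique).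
import Mathlib
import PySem

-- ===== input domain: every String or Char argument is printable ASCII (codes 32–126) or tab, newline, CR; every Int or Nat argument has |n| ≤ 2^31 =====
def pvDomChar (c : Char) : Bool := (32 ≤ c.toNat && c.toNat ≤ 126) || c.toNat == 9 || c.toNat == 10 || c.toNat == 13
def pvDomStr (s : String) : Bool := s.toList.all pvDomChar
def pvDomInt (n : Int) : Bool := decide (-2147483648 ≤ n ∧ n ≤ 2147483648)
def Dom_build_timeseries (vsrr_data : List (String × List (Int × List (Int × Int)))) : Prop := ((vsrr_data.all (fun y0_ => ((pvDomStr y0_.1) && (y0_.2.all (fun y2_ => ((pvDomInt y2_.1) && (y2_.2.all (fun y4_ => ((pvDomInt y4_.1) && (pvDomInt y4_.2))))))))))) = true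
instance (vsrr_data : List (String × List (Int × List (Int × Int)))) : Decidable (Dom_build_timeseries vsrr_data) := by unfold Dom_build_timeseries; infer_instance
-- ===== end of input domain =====

-- B replaces A's two nested sorted loops by building one flat (year, month, deaths) triple list,
-- sorting it once by the (year, month) tuple key, and mapping it to records (objective: alternative).

-- ===== PORT A =====
def pvTargetCounties : List (String × String) :=
  [("18097", "Marion"), ("18089", "Lake"), ("18003", "Allen"), ("18141", "St. Joseph"),
   ("18163", "Vanderburgh"), ("18157", "Tippecanoe"), ("18035", "Delaware"), ("18177", "Wayne"),
   ("18167", "Vigo"), ("18095", "Madison"), ("18019", "Clark"), ("18043", "Floyd"),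
   ("18143", "Scott"), ("18093", "Lawrence"), ("18041", "Fayette"), ("18075", "Jay"),
   ("18009", "Blackford"), ("18165", "Vermillion"), ("18065", "Henry"), ("18053", "Grant")]

def build_timeseries (vsrr_data : List (String × List (Int × List (Int × Int)))) : List (String × List (List (String × Int))) :=
  pvTargetCounties.foldl (fun timeseries fc =>
    let vsrr := (PySem.Dict.mk vsrr_data).getD fc.1 []
    let monthly := (PySem.List.sorted (vsrr.map (·.1)) (fun x => x)).foldl
      (fun monthly year =>
        let months := (PySem.Dict.mk vsrr).getD year []
        (PySem.List.sorted (months.map (·.1)) (fun x => x)).foldl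
          (fun monthly month =>
            monthly ++ [[("year", year), ("month", month),
                         ("deaths", (PySem.Dict.mk months).getD month 0)]]) monthly) []
    if monthly ≠ [] then timeseries ++ [(fc.2, monthly)] else timeseries) []

-- ===== PORT B =====
def build_timeseries_alt (vsrr_data : List (String × List (Int × List (Int × Int)))) : List (String × List (List (String × Int))) :=
  pvTargetCounties.foldl (fun timeseries fc =>
    let triples := ((PySem.Dict.mk vsrr_data).getD fc.1 []).flatMap
      (fun ym => ym.2.map (fun md => (ym.1, md.1, md.2)))
    let striples := PySem.List.sorted2 triples (fun t => t.1) (fun t => t.2.1)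
    let monthly := striples.map (fun t => [("year", t.1), ("month", t.2.1), ("deaths", t.2.2)])
    if monthly ≠ [] then timeseries ++ [(fc.2, monthly)] else timeseries) []

-- ===== PRECONDITION & SPEC =====
-- Pre_ excludes association lists with duplicate keys at any dict level: those do not represent a
-- Python dict (the argument of A is a dict, whose keys are unique), so the list encoding is ambiguous there.
def Pre_build_timeseries (vsrr_data : List (String × List (Int × List (Int × Int)))) : Prop :=
  (vsrr_data.map (·.1)).Nodup ∧
  ∀ p ∈ vsrr_data, (p.2.map (·.1)).Nodup ∧ ∀ q ∈ p.2, (q.2.map (·.1)).Nodup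
instance (vsrr_data : List (String × List (Int × List (Int × Int)))) : Decidable (Pre_build_timeseries vsrr_data) := by unfold Pre_build_timeseries; infer_instance

def pvWitness_build_timeseries : (List (String × List (Int × List (Int × Int)))) :=
  [("18097", [(2020, [(1, 5), (2, 3)]), (2021, [(1, 7)])]), ("18089", [])]

def Spec_build_timeseries (vsrr_data : List (String × List (Int × List (Int × Int)))) (out : List (String × List (List (String × Int)))) : Prop := out = build_timeseries_alt vsrr_data
instance (vsrr_data : List (String × List (Int × List (Int × Int)))) (out : List (String × List (List (String × Int)))) : Decidable (Spec_build_timeseries vsrr_data out) := by unfold Spec_build_timeseries; infer_instance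

-- ===== CLAIM (what is proved, stated in full; the proofs are below) =====
def Claim_equal_build_timeseries : Prop := ∀ (vsrr_data : List (String × List (Int × List (Int × Int)))), Dom_build_timeseries vsrr_data → Pre_build_timeseries vsrr_data → Spec_build_timeseries vsrr_data (build_timeseries vsrr_data)

-- ===== LEMMAS AND PROOFS =====

-- A's sorted-by-tuple-key agrees with sorting by the lexicographic order on pairs.
theorem pv_sorted2_eq_sorted_lex {α : Type} (xs : List α) (k1 k2 : α → Int) :
    PySem.List.sorted2 xs k1 k2 = PySem.List.sorted xs (fun x => toLex (k1 x, k2 x)) := by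
  rw [PySem.List.sorted_eq_foldl_insertBy]
  show List.foldl _ [] xs = _
  congr 1
  funext acc x
  congr 1
  funext a b
  show (decide (k1 a < k1 b) || (!decide (k1 b < k1 a) && decide (k2 a < k2 b))) = _
  by_cases h1 : k1 a < k1 b <;> by_cases h2 : k1 b < k1 a <;> by_cases h3 : k2 a < k2 b <;>
    simp [h1, h2, h3, Prod.Lex.lt_iff] <;> omega

-- A county's monthly list as A computes it (nested sorted loops).
def pvMonthlyA (vsrr : List (Int × List (Int × Int))) : List (List (String × Int)) :=
  (PySem.List.sorted (vsrr.map (·.1)) (fun x => x)).foldl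
    (fun monthly year =>
      let months := (PySem.Dict.mk vsrr).getD year []
      (PySem.List.sorted (months.map (·.1)) (fun x => x)).foldl
        (fun monthly month =>
          monthly ++ [[("year", year), ("month", month),
                       ("deaths", (PySem.Dict.mk months).getD month 0)]]) monthly) []

-- A county's monthly list as B computes it (flat sort once).
def pvMonthlyB (vsrr : List (Int × List (Int × Int))) : List (List (String × Int)) :=
  (PySem.List.sorted2 (vsrr.flatMap (fun ym => ym.2.map (fun md => (ym.1, md.1, md.2))))
      (fun t => t.1) (fun t => t.2.1)).map
    (fun t => [("year", t.1), ("month", t.2.1), ("deaths", t.2.2)])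

-- the triple list in A's nested order
def pvNested (vsrr : List (Int × List (Int × Int))) : List (Int × Int × Int) :=
  (PySem.List.sorted (vsrr.map (·.1)) (fun x => x)).flatMap
    (fun year =>
      (PySem.List.sorted (((PySem.Dict.mk vsrr).getD year []).map (·.1)) (fun x => x)).map
        (fun month => (year, month, (PySem.Dict.mk ((PySem.Dict.mk vsrr).getD year [])).getD month 0)))

theorem pv_monthlyA_eq_map_nested (vsrr : List (Int × List (Int × Int))) :
    pvMonthlyA vsrr =
      (pvNested vsrr).map (fun t => [("year", t.1), ("month", t.2.1), ("deaths", t.2.2)]) := by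
  unfold pvMonthlyA pvNested
  refine (PySem.List.foldl_congr_mem _ _
      (fun monthly year => monthly ++
        (PySem.List.sorted (((PySem.Dict.mk vsrr).getD year []).map (·.1)) (fun x => x)).map
          (fun month => [("year", year), ("month", month),
            ("deaths", (PySem.Dict.mk ((PySem.Dict.mk vsrr).getD year [])).getD month 0)]))
      []
      (fun acc year _ => PySem.List.foldl_append_singleton_eq_map _ _ _)).trans ?_
  rw [PySem.List.foldl_append_eq_flatMap, List.nil_append, List.map_flatMap]
  simp only [List.map_map, Function.comp_def]

theorem pv_getD_of_mem {κ ν : Type} [BEq κ] [LawfulBEq κ] (l : List (κ × ν)) (p : κ × ν)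
    (hmem : p ∈ l) (hnd : (l.map (·.1)).Nodup) (d0 : ν) :
    (PySem.Dict.mk l).getD p.1 d0 = p.2 :=
  PySem.Dict.getD_of_mem_items (PySem.Dict.mk l) (by exact hmem) (by exact hnd) d0

-- the nested triple list is a permutation of the flat triple list
theorem pv_nested_perm (vsrr : List (Int × List (Int × Int)))
    (h1 : (vsrr.map (·.1)).Nodup) (h2 : ∀ q ∈ vsrr, (q.2.map (·.1)).Nodup) :
    (pvNested vsrr).Perm (vsrr.flatMap (fun ym => ym.2.map (fun md => (ym.1, md.1, md.2)))) := by
  unfold pvNested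
  refine List.Perm.trans (List.Perm.flatMap (PySem.List.sorted_perm (vsrr.map (·.1)) _ false)
    (fun a _ => List.Perm.refl _)) ?_
  rw [List.flatMap_map]
  refine List.Perm.flatMap (List.Perm.refl vsrr) ?_
  intro p hp
  rw [pv_getD_of_mem vsrr p hp h1]
  refine List.Perm.trans (List.Perm.map _ (PySem.List.sorted_perm (p.2.map (·.1)) _ false)) ?_
  rw [List.map_map]
  refine List.Perm.of_eq (List.map_congr_left ?_)
  intro md hmd
  simp only [Function.comp]
  rw [pv_getD_of_mem p.2 md hmd (h2 p hp)]

-- the nested triple list is strictly increasing in the lexicographic (year, month) key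
theorem pv_nested_pairwise (vsrr : List (Int × List (Int × Int)))
    (h1 : (vsrr.map (·.1)).Nodup) (h2 : ∀ q ∈ vsrr, (q.2.map (·.1)).Nodup) :
    List.Pairwise (fun a b => (toLex (a.1, a.2.1) : Lex (Int × Int)) < toLex (b.1, b.2.1))
      (pvNested vsrr) := by
  unfold pvNested
  rw [List.pairwise_flatMap]
  constructor
  · intro year _
    rw [List.pairwise_map]
    have hmnd : ((PySem.Dict.mk vsrr).getD year []).map (·.1) |>.Nodup := by
      rcases Option.eq_none_or_eq_some ((PySem.Dict.mk vsrr).get? year) with h | ⟨v, h⟩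
      · rw [PySem.Dict.getD_eq_get?_getD, h]; simp
      · rw [PySem.Dict.getD_eq_get?_getD, h]
        exact h2 _ (PySem.Dict.mem_items_of_get?_eq_some _ h)
    have hsnd0 := (PySem.List.sorted_perm (((PySem.Dict.mk vsrr).getD year []).map
      (fun x : Int × Int => x.1)) (fun x => x) false).symm.nodup hmnd
    have hsnd : List.Pairwise (fun a b : Int => a ≠ b)
        (PySem.List.sorted (((PySem.Dict.mk vsrr).getD year []).map (·.1)) (fun x => x)) := hsnd0
    have hle := PySem.List.sorted_pairwise (((PySem.Dict.mk vsrr).getD year []).map (·.1))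
      (fun x => x)
    refine (hle.and hsnd).imp ?_
    intro a b hab
    have : a < b := lt_of_le_of_ne hab.1 hab.2
    simp [Prod.Lex.lt_iff, this]
  · have hsnd0 := (PySem.List.sorted_perm (vsrr.map
      (fun x : Int × List (Int × Int) => x.1)) (fun x => x) false).symm.nodup h1
    have hsnd : List.Pairwise (fun a b : Int => a ≠ b)
        (PySem.List.sorted (vsrr.map (·.1)) (fun x => x)) := hsnd0
    have hle := PySem.List.sorted_pairwise (vsrr.map (·.1)) (fun x => x)
    refine (hle.and hsnd).imp ?_
    intro y1 y2 hy x hx z hz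
    simp only [List.mem_map] at hx hz
    obtain ⟨m1, _, rfl⟩ := hx
    obtain ⟨m2, _, rfl⟩ := hz
    have : y1 < y2 := lt_of_le_of_ne hy.1 hy.2
    simp [Prod.Lex.lt_iff, this]

theorem pv_monthly_eq (vsrr : List (Int × List (Int × Int)))
    (h1 : (vsrr.map (·.1)).Nodup) (h2 : ∀ q ∈ vsrr, (q.2.map (·.1)).Nodup) :
    pvMonthlyA vsrr = pvMonthlyB vsrr := by
  rw [pv_monthlyA_eq_map_nested, pvMonthlyB, pv_sorted2_eq_sorted_lex]
  congr 1
  exact (PySem.List.sorted_eq_of_perm_of_pairwise_lt _ _ _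
    (pv_nested_perm vsrr h1 h2) (pv_nested_pairwise vsrr h1 h2)).symm

-- ===== VERDICT (by name: the statement is the Claim_ definition above) =====
theorem build_timeseries_spec : Claim_equal_build_timeseries := by
  intro vsrr_data _ hpre
  show build_timeseries vsrr_data = build_timeseries_alt vsrr_data
  unfold build_timeseries build_timeseries_alt
  refine PySem.List.foldl_congr_mem _ _ _ _ ?_
  intro acc fc _
  have hmeq : pvMonthlyA ((PySem.Dict.mk vsrr_data).getD fc.1 []) =
      pvMonthlyB ((PySem.Dict.mk vsrr_data).getD fc.1 []) := by
    rcases Option.eq_none_or_eq_some ((PySem.Dict.mk vsrr_data).get? fc.1) with h | ⟨v, h⟩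
    · rw [PySem.Dict.getD_eq_get?_getD, h]
      exact pv_monthly_eq [] (by simp) (by simp)
    · rw [PySem.Dict.getD_eq_get?_getD, h]
      have hv := PySem.Dict.mem_items_of_get?_eq_some _ h
      exact pv_monthly_eq v ((hpre.2 _ hv).1) ((hpre.2 _ hv).2)
  show (if pvMonthlyA _ ≠ [] then acc ++ [(fc.2, pvMonthlyA _)] else acc) =
       (if pvMonthlyB _ ≠ [] then acc ++ [(fc.2, pvMonthlyB _)] else acc)
  rw [hmeq]
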